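-- pv_equiv track=rewrite | github.com/annie-kuo/three-thirteen | arrangement.py | equal_or_less_occurrences
-- ===== SOURCE A (Python) =====
-- def equal_or_less_occurrences(elements, nested_tuple):
--     for element in set(elements):
--         x_count = elements.count(element)
--         nested_count = 0
--         for tup in nested_tuple:
--             nested_count += tup.count(element)
--             if nested_count > x_count:
--                 return False
--     return True
-- ===== SOURCE B (Python) =====
-- def equal_or_less_occurrences(elements, nested_tuple):
--     budget = {}
--     for e in elements:
--         budget[e] = budget.get(e, 0) + 1
--     for tup in nested_tuple:
--         for x in tup:
--             if x in budget:
--                 budget[x] -= 1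
--                 if budget[x] < 0:
--                     return False
--     return True
-- ===== Notes on version B (the rewrite author's own statement) =====
-- stated objective: alternative
-- what changed: Replaces the per-distinct-element rescan of elements and nested_tuple (set + repeated .count) with a budget dict built in one pass over elements and decremented in a single pass over the nested items, failing as soon as a budget drops below zero.
import Mathlib
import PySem

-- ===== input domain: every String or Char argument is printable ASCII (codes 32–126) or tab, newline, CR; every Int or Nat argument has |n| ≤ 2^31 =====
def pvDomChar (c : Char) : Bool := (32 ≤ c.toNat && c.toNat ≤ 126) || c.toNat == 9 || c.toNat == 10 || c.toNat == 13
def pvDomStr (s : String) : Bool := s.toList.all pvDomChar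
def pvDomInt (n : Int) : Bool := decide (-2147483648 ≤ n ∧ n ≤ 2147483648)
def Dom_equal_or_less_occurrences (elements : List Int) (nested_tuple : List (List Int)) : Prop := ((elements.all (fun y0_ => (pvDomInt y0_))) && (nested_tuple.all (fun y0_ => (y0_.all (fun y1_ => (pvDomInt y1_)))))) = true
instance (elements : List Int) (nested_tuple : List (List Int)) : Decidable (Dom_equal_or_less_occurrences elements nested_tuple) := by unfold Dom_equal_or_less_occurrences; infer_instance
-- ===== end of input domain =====

-- B replaces A's rescan per distinct element (set + .count over both lists) by one budget
-- dict built over elements and decremented in a single pass over the nested items (alternative).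

-- ===== PORT A =====
-- inner loop of A: 'for tup in nested_tuple: nested_count += tup.count(element); if nested_count > x_count: return False'
def pvAInner (element x_count : Int) (nc : Int) : List (List Int) → Bool
  | [] => true
  | tup :: rest =>
    let nc' := nc + (PySem.List.count tup element : Int)
    if nc' > x_count then false else pvAInner element x_count nc' rest

-- outer loop of A over set(elements)
def pvAOuter (elements : List Int) (nested_tuple : List (List Int)) : List Int → Bool
  | [] => true
  | e :: rest =>
    if pvAInner e (PySem.List.count elements e : Int) 0 nested_tuple then
      pvAOuter elements nested_tuple rest
    else false

def equal_or_less_occurrences (elements : List Int) (nested_tuple : List (List Int)) : Bool :=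
  pvAOuter elements nested_tuple (PySem.Set.ofList elements)

-- ===== PORT B =====
-- inner loop of B over one tuple: none = 'return False'
def pvBInner (budget : PySem.Dict Int Int) : List Int → Option (PySem.Dict Int Int)
  | [] => some budget
  | x :: xs =>
    if budget.contains x then
      let b := budget.insert x (budget.getD x 0 - 1)
      if b.getD x 0 < 0 then none else pvBInner b xs
    else pvBInner budget xs

-- outer loop of B over nested_tuple
def pvBOuter (budget : PySem.Dict Int Int) : List (List Int) → Bool
  | [] => true
  | tup :: rest =>
    match pvBInner budget tup with
    | none => false
    | some b => pvBOuter b rest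

def equal_or_less_occurrences_alt (elements : List Int) (nested_tuple : List (List Int)) : Bool :=
  -- budget built by 'budget[e] = budget.get(e, 0) + 1'
  let budget := elements.foldl (fun d e => d.insert e (d.getD e 0 + 1)) PySem.Dict.empty
  pvBOuter budget nested_tuple

-- ===== PRECONDITION & SPEC =====
def Spec_equal_or_less_occurrences (elements : List Int) (nested_tuple : List (List Int)) (out : Bool) : Prop := out = equal_or_less_occurrences_alt elements nested_tuple
instance (elements : List Int) (nested_tuple : List (List Int)) (out : Bool) : Decidable (Spec_equal_or_less_occurrences elements nested_tuple out) := by unfold Spec_equal_or_less_occurrences; infer_instance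

-- ===== CLAIM (what is proved, stated in full; the proofs are below) =====
def Claim_equal_equal_or_less_occurrences : Prop := ∀ (elements : List Int) (nested_tuple : List (List Int)), Dom_equal_or_less_occurrences elements nested_tuple → Spec_equal_or_less_occurrences elements nested_tuple (equal_or_less_occurrences elements nested_tuple)

-- ===== LEMMAS AND PROOFS =====

-- total number of occurrences of k in the nested tuples, as an Int
def pvTot (nested_tuple : List (List Int)) (k : Int) : Int :=
  (nested_tuple.map (fun t => (PySem.List.count t k : Int))).sum

lemma pvTot_nonneg (nt : List (List Int)) (k : Int) : 0 ≤ pvTot nt k := by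
  unfold pvTot
  induction nt with
  | nil => simp
  | cons t rest ih => simp only [List.map_cons, List.sum_cons]; positivity

lemma pvCount_cons_self (x : Int) (xs : List Int) :
    PySem.List.count (x :: xs) x = PySem.List.count xs x + 1 := by
  simp [PySem.List.count_eq]

lemma pvCount_cons_ne {k x : Int} (h : k ≠ x) (xs : List Int) :
    PySem.List.count (x :: xs) k = PySem.List.count xs k := by
  simp [PySem.List.count_eq, Ne.symm h]

lemma pvAInner_iff (e xc : Int) (nt : List (List Int)) (nc : Int) (h : nc ≤ xc) :
    pvAInner e xc nc nt = true ↔ nc + pvTot nt e ≤ xc := by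
  induction nt generalizing nc with
  | nil => simpa [pvAInner, pvTot] using h
  | cons t rest ih =>
    simp only [pvAInner, pvTot, List.map_cons, List.sum_cons]
    by_cases hgt : nc + (PySem.List.count t e : Int) > xc
    · simp only [hgt, if_pos]
      have := pvTot_nonneg rest e
      constructor
      · intro hf; cases hf
      · intro hle; exfalso; unfold pvTot at this; omega
    · simp only [hgt, if_false]
      rw [ih _ (by omega)]
      unfold pvTot
      constructor <;> intro <;> omega

lemma pvAOuter_iff (elements : List Int) (nt : List (List Int)) (s : List Int) :
    pvAOuter elements nt s = true ↔
      ∀ e ∈ s, pvTot nt e ≤ (PySem.List.count elements e : Int) := by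
  induction s with
  | nil => simp [pvAOuter]
  | cons e rest ih =>
    have hiff := pvAInner_iff e (PySem.List.count elements e : Int) nt 0 (by positivity)
    simp only [pvAOuter]
    cases hA : pvAInner e (PySem.List.count elements e : Int) 0 nt with
    | false =>
      rw [hA] at hiff
      simp only [if_false, Bool.false_eq_true, false_iff]
      intro hall
      have := hall e (List.mem_cons_self)
      simp only [Bool.false_eq_true, false_iff] at hiff
      exact hiff (by omega)
    | true =>
      rw [hA] at hiff
      simp only [if_true, ih, List.mem_cons]
      constructor
      · intro hall k hk
        rcases hk with rfl | hk
        · have := hiff.mp rfl; omega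
        · exact hall k hk
      · intro hall k hk; exact hall k (Or.inr hk)

-- characterisation of B's inner loop (budgets stay nonnegative throughout)
lemma pvBInner_spec (tup : List Int) (budget : PySem.Dict Int Int)
    (hpos : ∀ k, budget.contains k = true → 0 ≤ budget.getD k 0) :
    (pvBInner budget tup = none ↔
        ∃ k, budget.contains k = true ∧ budget.getD k 0 < (PySem.List.count tup k : Int)) ∧
    (∀ b', pvBInner budget tup = some b' →
        (∀ k, b'.contains k = budget.contains k) ∧
        (∀ k, b'.getD k 0 =
          budget.getD k 0 - (if budget.contains k then (PySem.List.count tup k : Int) else 0))) := by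
  induction tup generalizing budget with
  | nil =>
    constructor
    · simp only [pvBInner, reduceCtorEq, false_iff]
      rintro ⟨k, hk, hlt⟩
      have := hpos k hk
      simp [PySem.List.count_eq] at hlt
      omega
    · intro b' hb'
      simp only [pvBInner, Option.some.injEq] at hb'
      subst hb'
      exact ⟨fun k => rfl, fun k => by simp [PySem.List.count_eq]⟩
  | cons x xs ih =>
    by_cases hx : budget.contains x = true
    · set b1 := budget.insert x (budget.getD x 0 - 1) with hb1
      have hgD : ∀ k, b1.getD k 0 = if k = x then budget.getD x 0 - 1 else budget.getD k 0 := by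
        intro k; rw [hb1, PySem.Dict.getD_insert]
      have hct : ∀ k, b1.contains k = budget.contains k := by
        intro k
        rw [hb1, PySem.Dict.contains_insert]
        by_cases hkx : k = x
        · subst hkx; simp [hx]
        · simp [hkx]
      by_cases hneg : b1.getD x 0 < 0
      · -- immediate 'return False'
        have hnone : pvBInner budget (x :: xs) = none := by
          simp [pvBInner, hx, ← hb1, hneg]
        constructor
        · simp only [hnone, true_iff]
          refine ⟨x, hx, ?_⟩
          rw [hgD x, if_pos rfl] at hneg
          have := Int.natCast_nonneg (PySem.List.count xs x)
          rw [pvCount_cons_self]; push_cast; omega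
        · intro b' hb'; rw [hnone] at hb'; cases hb'
      · have hstep : pvBInner budget (x :: xs) = pvBInner b1 xs := by
          simp [pvBInner, hx, ← hb1, hneg]
        have hpos1 : ∀ k, b1.contains k = true → 0 ≤ b1.getD k 0 := by
          intro k hk
          rw [hgD k]
          by_cases hkx : k = x
          · subst hkx; rw [if_pos rfl]; rw [hgD k, if_pos rfl] at hneg; omega
          · simp only [if_neg hkx]; exact hpos k (by rw [← hct k]; exact hk)
        obtain ⟨ihn, ihs⟩ := ih b1 hpos1
        constructor
        · rw [hstep, ihn]
          constructor
          · rintro ⟨k, hk, hlt⟩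
            refine ⟨k, by rw [← hct k]; exact hk, ?_⟩
            rw [hgD k] at hlt
            by_cases hkx : k = x
            · subst hkx
              rw [if_pos rfl] at hlt
              rw [pvCount_cons_self]; push_cast; omega
            · simp only [if_neg hkx] at hlt
              rw [pvCount_cons_ne hkx]; exact hlt
          · rintro ⟨k, hk, hlt⟩
            refine ⟨k, by rw [hct k]; exact hk, ?_⟩
            rw [hgD k]
            by_cases hkx : k = x
            · subst hkx
              rw [if_pos rfl]
              rw [pvCount_cons_self] at hlt; push_cast at hlt; omega
            · simp only [if_neg hkx]
              rw [pvCount_cons_ne hkx] at hlt; exact hlt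
        · intro b' hb'
          rw [hstep] at hb'
          obtain ⟨hc', hg'⟩ := ihs b' hb'
          refine ⟨fun k => by rw [hc' k, hct k], ?_⟩
          intro k
          rw [hg' k, hgD k, hct k]
          by_cases hkx : k = x
          · subst hkx
            rw [if_pos rfl, pvCount_cons_self]
            simp only [hx, if_true]
            push_cast; ring
          · simp only [if_neg hkx, pvCount_cons_ne hkx]
    · -- x not in budget: skipped
      have hx' : budget.contains x = false := by
        cases h : budget.contains x
        · rfl
        · exact absurd h hx
      have hstep : pvBInner budget (x :: xs) = pvBInner budget xs := by
        simp [pvBInner, hx']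
      obtain ⟨ihn, ihs⟩ := ih budget hpos
      have hcnt : ∀ k, budget.contains k = true →
          PySem.List.count (x :: xs) k = PySem.List.count xs k := by
        intro k hk
        have hkx : k ≠ x := by rintro rfl; rw [hk] at hx'; cases hx'
        exact pvCount_cons_ne hkx xs
      constructor
      · rw [hstep, ihn]
        constructor
        · rintro ⟨k, hk, hlt⟩; exact ⟨k, hk, by rw [hcnt k hk]; exact hlt⟩
        · rintro ⟨k, hk, hlt⟩; exact ⟨k, hk, by rw [← hcnt k hk]; exact hlt⟩
      · intro b' hb'
        rw [hstep] at hb'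
        obtain ⟨hc', hg'⟩ := ihs b' hb'
        refine ⟨hc', ?_⟩
        intro k
        rw [hg' k]
        by_cases hk : budget.contains k = true
        · simp only [hk, if_true, hcnt k hk]
        · have hkf : budget.contains k = false := by
            cases h : budget.contains k
            · rfl
            · exact absurd h hk
          simp [hkf]

lemma pvBOuter_iff (nt : List (List Int)) (budget : PySem.Dict Int Int)
    (hpos : ∀ k, budget.contains k = true → 0 ≤ budget.getD k 0) :
    pvBOuter budget nt = true ↔
      ∀ k, budget.contains k = true → pvTot nt k ≤ budget.getD k 0 := by
  induction nt generalizing budget with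
  | nil =>
    simp only [pvBOuter, pvTot, List.map_nil, List.sum_nil, true_iff]
    intro k hk; exact hpos k hk
  | cons tup rest ih =>
    obtain ⟨hn, hs⟩ := pvBInner_spec tup budget hpos
    simp only [pvBOuter]
    cases hres : pvBInner budget tup with
    | none =>
      simp only [Bool.false_eq_true, false_iff]
      obtain ⟨k, hk, hlt⟩ := hn.mp hres
      intro hall
      have := hall k hk
      have htot := pvTot_nonneg rest k
      unfold pvTot at this htot
      simp only [List.map_cons, List.sum_cons] at this
      omega
    | some b' =>
      obtain ⟨hc', hg'⟩ := hs b' hres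
      have hnotnone : ¬ ∃ k, budget.contains k = true ∧
          budget.getD k 0 < (PySem.List.count tup k : Int) := by
        rw [← hn]; simp [hres]
      push Not at hnotnone
      have hpos' : ∀ k, b'.contains k = true → 0 ≤ b'.getD k 0 := by
        intro k hk
        rw [hc' k] at hk
        rw [hg' k]
        simp only [hk, if_true]
        have := hnotnone k hk
        omega
      rw [ih b' hpos']
      constructor
      · intro hall k hk
        have hb := hall k (by rw [hc' k]; exact hk)
        rw [hg' k] at hb
        simp only [hk, if_true] at hb
        unfold pvTot at hb ⊢
        simp only [List.map_cons, List.sum_cons]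
        omega
      · intro hall k hk
        rw [hc' k] at hk
        have hb := hall k hk
        rw [hg' k]
        simp only [hk, if_true]
        unfold pvTot at hb ⊢
        simp only [List.map_cons, List.sum_cons] at hb
        omega

-- ===== VERDICT (by name: the statement is the Claim_ definition above) =====
theorem equal_or_less_occurrences_spec : Claim_equal_equal_or_less_occurrences := by
  intro elements nested_tuple _
  unfold Spec_equal_or_less_occurrences equal_or_less_occurrences equal_or_less_occurrences_alt
  rw [PySem.Dict.foldl_insert_getD_add_one_eq_counter]
  have hpos : ∀ k, (PySem.Dict.counter elements).contains k = true →
      0 ≤ (PySem.Dict.counter elements).getD k 0 := by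
    intro k _
    rw [PySem.Dict.getD_counter]
    positivity
  rw [eq_comm, Bool.eq_iff_iff, pvAOuter_iff, pvBOuter_iff _ _ hpos]
  constructor
  · intro hall k hk
    have hc : (PySem.Dict.counter elements).contains k = true := by
      rw [PySem.Dict.contains_counter]
      have hk' : k ∈ elements := by simpa [PySem.Set.mem_ofList] using hk
      simpa using hk'
    have := hall k hc
    rwa [PySem.Dict.getD_counter, ← PySem.List.count_eq] at this
  · intro hall e he
    rw [PySem.Dict.getD_counter, ← PySem.List.count_eq]
    refine hall e ?_
    rw [PySem.Dict.contains_counter] at he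
    have he' : e ∈ elements := by simpa using he
    simpa [PySem.Set.mem_ofList] using he'
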